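-- pv_equiv track=rewrite | github.com/jeffreyyoo/SICER-2 | sicer/src/coarsegraining.py | graining
-- ===== SOURCE A (Python) =====
-- def graining(List, win, step, score):
-- 	'''
-- 	1 step coarse graining, phase considered:
-- 	List must be sorted!
-- 	List (list) contains (start) coordinates of positive signals;
-- 	win (int) is the window size in list, coarse graining will start from this resolution;
-- 	step (int) is the number of windows in one graining unit;
-- 	score (int) is the minimum number of positive elements in the graining unit to call the unit positive;
-- 	output is a list of positive unit number in each graining step;
-- 	'''
-- 	result = []
-- 	endlimit = List[-1]
-- 	for p in range(0, step):
-- 		tmp_result = []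
-- 		i = List[0] - p * win
-- 		k = 0
-- 		while i <= endlimit and k < len(List):
-- 			j = i + step * win
-- 			h = k
-- 			while h <= (len(List)-1) and List[h] < j:
-- 				h += 1
-- 			n = h - k
-- 			if n >= score:
-- 				tmp_result.append(i)
-- 			k = h
-- 			i = j
-- 		if len(tmp_result) > len(result):
-- 			result = tmp_result
-- 	return(result)
-- ===== SOURCE B (Python) =====
-- def _phase(lst, W, score, endlimit, i0):
--     # one phase: merge-style single pass over the elements, advancing the
--     # window boundary past each element instead of scanning indices per window
--     if i0 > endlimit:
--         return []
--     i, cnt, tmp = i0, 0, []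
--     active = True
--     for x in lst:
--         while x >= i + W:
--             if cnt >= score:
--                 tmp.append(i)
--             i += W
--             cnt = 0
--             if i > endlimit:
--                 active = False
--                 break
--         if not active:
--             break
--         cnt += 1
--     if active and cnt >= score:
--         tmp.append(i)
--     return tmp
--
--
-- def graining(List, win, step, score):
--     endlimit = List[-1]
--     W = step * win
--     phases = [_phase(List, W, score, endlimit, List[0] - p * win) for p in range(step)]
--     return max(phases, key=len, default=[])
-- ===== Notes on version B (the rewrite author's own statement) =====
-- stated objective: alternative
-- what changed: Each phase is computed by a single merge-style pass over the list elements (advancing the window boundary past each element with a running in-window counter) instead of A's window-driven outer loop with an inner index scan per window, and the best phase is selected with max(key=len, default=[]) over a list of per-phase results instead of A's running strictly-longer comparison.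
import Mathlib
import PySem

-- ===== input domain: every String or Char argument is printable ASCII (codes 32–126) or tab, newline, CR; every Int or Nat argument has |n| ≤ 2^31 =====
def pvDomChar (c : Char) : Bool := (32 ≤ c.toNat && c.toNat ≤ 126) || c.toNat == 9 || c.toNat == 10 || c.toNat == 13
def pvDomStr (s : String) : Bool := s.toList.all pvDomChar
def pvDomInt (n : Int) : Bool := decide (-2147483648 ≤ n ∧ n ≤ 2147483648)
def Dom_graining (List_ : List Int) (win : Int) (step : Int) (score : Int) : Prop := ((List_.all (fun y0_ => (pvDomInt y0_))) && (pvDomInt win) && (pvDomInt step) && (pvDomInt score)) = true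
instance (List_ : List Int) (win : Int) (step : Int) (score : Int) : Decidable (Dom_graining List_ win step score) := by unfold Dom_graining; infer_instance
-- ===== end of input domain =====

-- B re-implements each phase as one merge-style pass over the elements (window boundary
-- advanced past each element) instead of A's window-driven loop with an inner index scan;
-- the best phase is picked with max(key=len). Alternative decomposition, same cost.

-- ===== PORT A =====

-- inner while: h advances while h <= len(List)-1 and List[h] < j
def scanH (L : List Int) (j : Int) (h : Nat) : Nat :=
  if _hc : h < L.length ∧ L.getD h 0 < j then scanH L j (h + 1) else h
termination_by L.length - h
decreasing_by omega

-- outer while of one phase; the 0 < W test is a totality guard only: when W ≤ 0 and the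
-- loop is entered the Python loops forever (such inputs are excluded by Pre_graining)
def loopA (L : List Int) (endlimit W score i : Int) (k : Nat) (tmp : List Int) : List Int :=
  if _hc : i ≤ endlimit ∧ k < L.length then
    if _hW : 0 < W then
      let h := scanH L (i + W) k
      let tmp' := if ((h : Int) - (k : Int)) ≥ score then tmp ++ [i] else tmp
      loopA L endlimit W score (i + W) h tmp'
    else tmp
  else tmp
termination_by (endlimit + W - i).toNat
decreasing_by omega

def graining (List_ : List Int) (win : Int) (step : Int) (score : Int) : List Int :=
  match List_.getLast? with
  | none => []   -- Python raises IndexError on List[-1]; excluded by Pre_graining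
  | some endlimit =>
    (PySem.List.pyRange 0 step 1).foldl
      (fun result p =>
        let tmp := loopA List_ endlimit (step * win) score (List_.headD 0 - p * win) 0 []
        if tmp.length > result.length then tmp else result) []

-- ===== PORT B =====

-- the inner while of Source B's _phase: advance the window boundary past element x,
-- closing windows; returns (i, cnt, tmp, active).  The 0 < W test is a totality
-- guard only (Python loops forever there; unreachable under Pre_graining).
def advB (endlimit W score x i cnt : Int) (tmp : List Int) : Int × Int × List Int × Bool :=
  if _hc : 0 < W ∧ i + W ≤ x then
    let tmp' := if cnt ≥ score then tmp ++ [i] else tmp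
    if i + W > endlimit then (i + W, 0, tmp', false)
    else advB endlimit W score x (i + W) 0 tmp'
  else (i, cnt, tmp, true)
termination_by (x - i).toNat
decreasing_by omega

-- the for-loop of Source B's _phase
def runB (endlimit W score : Int) : List Int → Int → Int → List Int → Int × Int × List Int × Bool
  | [], i, cnt, tmp => (i, cnt, tmp, true)
  | x :: xs, i, cnt, tmp =>
    match advB endlimit W score x i cnt tmp with
    | (i', cnt', tmp', true) => runB endlimit W score xs i' (cnt' + 1) tmp'
    | (i', cnt', tmp', false) => (i', cnt', tmp', false)

-- the final 'if active and cnt >= score: tmp.append(i)' of _phase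
def finB (score : Int) (s : Int × Int × List Int × Bool) : List Int :=
  if s.2.2.2 = true ∧ s.2.1 ≥ score then s.2.2.1 ++ [s.1] else s.2.2.1

def phaseB (L : List Int) (W score endlimit i0 : Int) : List Int :=
  if i0 > endlimit then [] else finB score (runB endlimit W score L i0 0 [])

def graining_alt (List_ : List Int) (win : Int) (step : Int) (score : Int) : List Int :=
  match List_.getLast? with
  | none => []   -- Python raises IndexError on List[-1]; excluded by Pre_graining
  | some endlimit =>
    let phases := (PySem.List.pyRange 0 step 1).map
      (fun p => phaseB List_ (step * win) score endlimit (List_.headD 0 - p * win))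
    PySem.List.maxD phases (fun t => t.length) []

-- ===== PRECONDITION & SPEC =====
-- Pre_ excludes exactly the inputs where the Python A does not return normally: the empty
-- list (IndexError on List[-1]) and step > 0 with win ≤ 0 and List[0] ≤ List[-1], on which
-- A's while loop never terminates (i never increases past endlimit).
def Pre_graining (List_ : List Int) (win : Int) (step : Int) (score : Int) : Prop :=
  List_ ≠ [] ∧ (0 < step → 0 < win ∨ List_.getLastD 0 < List_.headD 0)
instance (List_ : List Int) (win : Int) (step : Int) (score : Int) : Decidable (Pre_graining List_ win step score) := by unfold Pre_graining; infer_instance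

def pvWitness_graining : List Int × Int × Int × Int := ([0, 3, 5], 1, 2, 1)

def Spec_graining (List_ : List Int) (win : Int) (step : Int) (score : Int) (out : List Int) : Prop := out = graining_alt List_ win step score
instance (List_ : List Int) (win : Int) (step : Int) (score : Int) (out : List Int) : Decidable (Spec_graining List_ win step score out) := by unfold Spec_graining; infer_instance

-- ===== CLAIM (what is proved, stated in full; the proofs are below) =====
def Claim_equal_graining : Prop := ∀ (List_ : List Int) (win : Int) (step : Int) (score : Int), Dom_graining List_ win step score → Pre_graining List_ win step score → Spec_graining List_ win step score (graining List_ win step score)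

-- ===== LEMMAS AND PROOFS =====

-- characterisation of A's inner scan
lemma scanH_props (L : List Int) (j : Int) :
    ∀ (d k : Nat), L.length - k ≤ d → k ≤ L.length →
      k ≤ scanH L j k ∧ scanH L j k ≤ L.length ∧
      (scanH L j k = L.length ∨ j ≤ L.getD (scanH L j k) 0) ∧
      (∀ m, k ≤ m → m < scanH L j k → L.getD m 0 < j) := by
  intro d
  induction d with
  | zero =>
    intro k hd hk
    have hkl : k = L.length := by omega
    rw [scanH, dif_neg (by omega)]
    exact ⟨le_refl _, by omega, Or.inl hkl, fun m h1 h2 => absurd (lt_of_le_of_lt h1 h2) (lt_irrefl _)⟩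
  | succ d IH =>
    intro k hd hk
    rw [scanH]
    by_cases hc : k < L.length ∧ L.getD k 0 < j
    · rw [dif_pos hc]
      have := IH (k + 1) (by omega) (by omega)
      refine ⟨by omega, this.2.1, this.2.2.1, ?_⟩
      intro m h1 h2
      rcases Nat.eq_or_lt_of_le h1 with h | h
      · exact h ▸ hc.2
      · exact this.2.2.2 m h h2
    · rw [dif_neg hc]
      refine ⟨le_refl _, hk, ?_, fun m h1 h2 => absurd (lt_of_le_of_lt h1 h2) (lt_irrefl _)⟩
      rcases Nat.eq_or_lt_of_le hk with h | h
      · exact Or.inl h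
      · exact Or.inr (le_of_not_gt fun hg => hc ⟨h, hg⟩)

-- B's fold absorbs a run of elements below the boundary as cnt increments
lemma runB_scan (L : List Int) (el W score i : Int) :
    ∀ (d k : Nat) (c : Int) (tmp : List Int), L.length - k ≤ d →
      runB el W score (L.drop k) i c tmp
        = runB el W score (L.drop (scanH L (i + W) k)) i
            (c + ((scanH L (i + W) k : Int) - (k : Int))) tmp := by
  intro d
  induction d with
  | zero =>
    intro k c tmp hd
    rw [scanH, dif_neg (by omega)]
    simp
  | succ d IH =>
    intro k c tmp hd
    rw [scanH]
    by_cases hc : k < L.length ∧ L.getD k 0 < i + W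
    · rw [dif_pos hc]
      have hdrop : L.drop k = L[k] :: L.drop (k + 1) := List.drop_eq_getElem_cons hc.1
      have hx : L.getD k 0 = L[k] := List.getD_eq_getElem L 0 hc.1
      rw [hdrop, runB]
      have hadv : advB el W score L[k] i c tmp = (i, c, tmp, true) := by
        rw [advB, dif_neg (by rw [← hx]; omega)]
      rw [hadv]; show runB el W score (List.drop (k + 1) L) i (c + 1) tmp = _
      have := IH (k + 1) (c + 1) tmp (by omega)
      rw [this]
      congr 1
      push_cast
      ring
    · rw [dif_neg hc]
      simp

-- main loop correspondence: A's window-driven loop equals B's element-driven fold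
lemma loopA_eq (L : List Int) (el W score : Int) (hW : 0 < W) :
    ∀ (d : Nat) (i : Int) (k : Nat) (tmp : List Int),
      (el + W - i).toNat ≤ d → i ≤ el → k < L.length →
      loopA L el W score i k tmp = finB score (runB el W score (L.drop k) i 0 tmp) := by
  intro d
  induction d with
  | zero => intro i k tmp hd hi hk; omega
  | succ d IH =>
    intro i k tmp hd hi hk
    set h := scanH L (i + W) k with hh
    obtain ⟨hkh, hhl, hstop, hbelow⟩ := scanH_props L (i + W) L.length k (by omega) (by omega)
    rw [← hh] at hkh hhl hstop hbelow
    rw [runB_scan L el W score i L.length k 0 tmp (by omega), ← hh]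
    rw [loopA, dif_pos ⟨hi, hk⟩, dif_pos hW]
    simp only [← hh, zero_add]
    set n : Int := (h : Int) - (k : Int) with hn
    set tmp' := if n ≥ score then tmp ++ [i] else tmp with htmp'
    rcases Nat.eq_or_lt_of_le hhl with hlen | hlt
    · -- h = length: rest of list consumed; B's final close equals A's last window
      rw [hlen, List.drop_length, runB]
      rw [loopA, dif_neg (by omega)]
      simp only [finB, htmp']
      simp
    · -- h < length: element L[h] ≥ i+W triggers the window close in B
      have hxge : i + W ≤ L.getD h 0 := by
        rcases hstop with h1 | h1
        · omega
        · exact h1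
      have hdrop : L.drop h = L[h] :: L.drop (h + 1) := List.drop_eq_getElem_cons hlt
      have hx : L.getD h 0 = L[h] := List.getD_eq_getElem L 0 hlt
      rw [hdrop, runB]
      by_cases hje : i + W > el
      · -- window close deactivates B; A's next loop test fails: both stop with tmp'
        have hadv : advB el W score L[h] i n tmp = (i + W, 0, tmp', false) := by
          rw [advB, dif_pos (by rw [← hx]; exact ⟨hW, hxge⟩), if_pos hje]
        rw [hadv]
        rw [loopA, dif_neg (by omega)]
        show tmp' = finB score (i + W, 0, tmp', false)
        simp [finB]
      · -- window advances; identify with the recursive loopA call via IH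
        have hadv : advB el W score L[h] i n tmp = advB el W score L[h] (i + W) 0 tmp' := by
          rw [advB, dif_pos (by rw [← hx]; exact ⟨hW, hxge⟩), if_neg hje]
        rw [hadv]
        have hrB : (match advB el W score L[h] (i + W) 0 tmp' with
            | (i', cnt', tmp', true) => runB el W score (L.drop (h + 1)) i' (cnt' + 1) tmp'
            | (i', cnt', tmp', false) => (i', cnt', tmp', false))
            = runB el W score (L.drop h) (i + W) 0 tmp' := by
          rw [hdrop, runB]
        rw [hrB]
        rw [IH (i + W) h tmp' (by omega) (by omega) hlt]

-- per-phase equality under Pre_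
lemma phase_eq (L : List Int) (el win step score p : Int) (hne : L ≠ [])
    (hlast : L.getLast? = some el) (hPre2 : 0 < win ∨ L.getLastD 0 < L.headD 0)
    (hp : 0 ≤ p) (hstep : 0 < step) :
    loopA L el (step * win) score (L.headD 0 - p * win) 0 []
      = phaseB L (step * win) score el (L.headD 0 - p * win) := by
  have hel : L.getLastD 0 = el := by rw [List.getLastD_eq_getLast?, hlast]; rfl
  by_cases h0 : L.headD 0 - p * win > el
  · rw [phaseB, if_pos h0, loopA, dif_neg (by omega)]
  · push_neg at h0
    have hW : 0 < step * win := by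
      rcases hPre2 with hwin | hlh
      · exact mul_pos hstep hwin
      · by_cases hwin : 0 < win
        · exact mul_pos hstep hwin
        · exfalso; push_neg at hwin; nlinarith
    rw [phaseB, if_neg (by omega)]
    have := loopA_eq L el (step * win) score hW (el + step * win - (L.headD 0 - p * win)).toNat
      (L.headD 0 - p * win) 0 [] le_rfl h0 (List.length_pos_of_ne_nil hne)
    rw [List.drop_zero] at this
    exact this

-- A's running 'keep the strictly longer' fold is Python max(key=len, default=[])
def bestStep (acc : Option (List Int)) (x : List Int) : Option (List Int) :=
  match acc with
  | none => some x
  | some m => if m.length < x.length then some x else some m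

lemma max?_eq_foldl_bestStep (ts : List (List Int)) :
    PySem.List.max? ts (fun t => t.length) = ts.foldl bestStep none := by
  unfold PySem.List.max?
  exact PySem.List.foldl_congr_mem ts _ bestStep none
    (fun acc x _ => by cases acc <;> rfl)

lemma foldl_best_some (ts : List (List Int)) :
    ∀ (r : List Int),
      ts.foldl bestStep (some r)
      = some (ts.foldl (fun r t => if t.length > r.length then t else r) r) := by
  induction ts with
  | nil => intro r; rfl
  | cons t ts IH =>
    intro r
    simp only [List.foldl_cons, gt_iff_lt, bestStep]
    by_cases hc : r.length < t.length
    · rw [if_pos hc, if_pos hc, IH]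
    · rw [if_neg hc, if_neg hc, IH]

lemma foldl_best_eq_maxD (ts : List (List Int)) :
    ts.foldl (fun r t => if t.length > r.length then t else r) []
      = PySem.List.maxD ts (fun t => t.length) [] := by
  cases ts with
  | nil => rfl
  | cons t ts =>
    show _ = (PySem.List.max? (t :: ts) (fun t => t.length)).getD []
    rw [max?_eq_foldl_bestStep]
    rw [show List.foldl bestStep none (t :: ts) = List.foldl bestStep (some t) ts from rfl]
    rw [foldl_best_some ts t]
    simp only [List.foldl_cons]
    have ht : (if t.length > ([] : List Int).length then t else []) = t := by
      cases t <;> simp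
    rw [ht]
    rfl

-- ===== VERDICT (by name: the statement is the Claim_ definition above) =====
theorem graining_spec : Claim_equal_graining := by
  intro L win step score hDom hPre
  obtain ⟨hne, hPre2⟩ := hPre
  unfold Spec_graining graining graining_alt
  cases hL : L.getLast? with
  | none => exact absurd (List.getLast?_eq_none_iff.mp hL) hne
  | some el =>
    show (PySem.List.pyRange 0 step 1).foldl
        (fun result p =>
          let tmp := loopA L el (step * win) score (L.headD 0 - p * win) 0 []
          if tmp.length > result.length then tmp else result) []
      = PySem.List.maxD
          ((PySem.List.pyRange 0 step 1).map
            (fun p => phaseB L (step * win) score el (L.headD 0 - p * win)))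
          (fun t => t.length) []
    rw [← foldl_best_eq_maxD, List.foldl_map]
    apply PySem.List.foldl_congr_mem
    intro acc p hp
    rw [PySem.List.mem_pyRange_one] at hp
    have hstep : (0:Int) < step := lt_of_le_of_lt hp.1 hp.2
    have he := phase_eq L el win step score p hne hL (hPre2 hstep) hp.1 hstep
    simp only [he]
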